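-- pv_equiv track=rewrite | github.com/Pooja2420/Python | Palindrome.py | pal_date
-- ===== SOURCE A (Python) =====
-- def is_palindrome(s):
--     # If the date is equal to date when read from left to right and right to left are same then returns true else returns false.
--     return s == s[::-1]
--
-- def pal_date(start,end):
-- # Creating empty list to store the palindrome dates.
--     dates = []
--     # A loop to iterate over the years from 2001 to 2100 where 2001 is inclsive and 2100 is not inclusive so the loop stop when the range becomes 2099.
--     for year in range(start,end+1):
--         # A loop to iterate over the months from 1 to 13 where 1 is inclsive and 13 is not inclusive so the loop stop when the range becomes 12.
--         for month in range(1, 13):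
--             # Creating variable to store the number of days in each month
--             # Assuming that February has 28 days in every year
--             if month in [1, 3, 5, 7, 8, 10, 12] :
--                 days = 31
--             elif month in [4, 6, 9, 11]:
--                 days=30
--             else:
--                 days= 28
--             # Iterating from from 1 to days + 1 since the last number will not ne inclusive in range function.
--             for day in range(1, days + 1):
--                 # A variable to store the date as a string in DD/MM/YYYY format
--                 true_date=(f"{day:02d}/{month:02d}/{year:04d}")
--                 # A variable to store the date as a string in DDMMYYYY format
--                 date = f"{day:02d}{month:02d}{year:04d}"
--                #Calling the is_palindrome function.
--                 if is_palindrome(date):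
--                     # If the date is a palindrome, append it to the list.
--                     dates.append(true_date)
--     return dates
-- ===== SOURCE B (Python) =====
-- def pal_date(start, end):
--     # Build the single candidate day/month per year from the reversed year
--     # string and validate it by table lookup.
--     month_len = [31, 28, 31, 30, 31, 30, 31, 31, 30, 31, 30, 31]
--     valid_days = {f"{m:02d}": {f"{d:02d}" for d in range(1, month_len[m - 1] + 1)}
--                   for m in range(1, 13)}
--     dates = []
--     for year in range(start, end + 1):
--         ys = f"{year:04d}"
--         rev = ys[::-1]
--         dd, mm = rev[:2], rev[2:4]
--         s = dd + mm + ys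
--         if mm in valid_days and dd in valid_days[mm] and s == s[::-1]:
--             dates.append(f"{dd}/{mm}/{ys}")
--     return dates
-- ===== Notes on version B (the rewrite author's own statement) =====
-- stated objective: alternative
-- what changed: Instead of testing every day of every month of each year for palindromicity, B constructs the single candidate DD/MM from the reversed year string and validates it against a precomputed month -> valid-day-strings table.
import Mathlib
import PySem

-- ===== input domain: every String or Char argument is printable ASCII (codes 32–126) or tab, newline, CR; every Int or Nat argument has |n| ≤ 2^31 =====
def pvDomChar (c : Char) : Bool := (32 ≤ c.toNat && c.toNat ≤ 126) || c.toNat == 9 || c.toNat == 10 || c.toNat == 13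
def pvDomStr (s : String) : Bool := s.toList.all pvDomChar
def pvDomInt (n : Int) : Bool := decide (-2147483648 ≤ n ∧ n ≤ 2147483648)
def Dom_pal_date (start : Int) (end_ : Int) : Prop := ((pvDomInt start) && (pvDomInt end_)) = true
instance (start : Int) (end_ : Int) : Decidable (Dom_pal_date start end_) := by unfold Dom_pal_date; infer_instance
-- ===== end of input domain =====

-- ===== PORT A =====
-- B builds the single palindrome candidate per year from the reversed year string instead of testing every date.
-- f"{n:02d}" / f"{n:04d}" for an int n is str(n).zfill(w); PySem.Str.zfill/Int.toStr are Python-exact.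
def fmtPad (n : Int) (w : Int) : String := PySem.Str.zfill (PySem.Int.toStr n) w

-- s[::-1]; step -1 never raises, so the getD default is never used
def pyRev (s : String) : String := (PySem.Str.slice? s none none (-1)).getD s

def is_palindrome (s : String) : Bool := s == pyRev s

def pal_date (start : Int) (end_ : Int) : List String :=
  (PySem.List.pyRange start (end_ + 1) 1).foldl (fun dates year =>
    (PySem.List.pyRange 1 13 1).foldl (fun dates month =>
      let days : Int :=
        if month ∈ ([1, 3, 5, 7, 8, 10, 12] : List Int) then 31
        else if month ∈ ([4, 6, 9, 11] : List Int) then 30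
        else 28
      (PySem.List.pyRange 1 (days + 1) 1).foldl (fun dates day =>
        let true_date := fmtPad day 2 ++ "/" ++ fmtPad month 2 ++ "/" ++ fmtPad year 4
        let date := fmtPad day 2 ++ fmtPad month 2 ++ fmtPad year 4
        if is_palindrome date then dates ++ [true_date] else dates) dates) dates) []

-- ===== PORT B =====
def pal_date_alt (start : Int) (end_ : Int) : List String :=
  let month_len : List Int := [31, 28, 31, 30, 31, 30, 31, 31, 30, 31, 30, 31]
  let valid_days : PySem.Dict String (PySem.Set String) :=
    (PySem.List.pyRange 1 13 1).foldl (fun d m =>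
      d.insert (fmtPad m 2)
        (PySem.Set.ofList
          ((PySem.List.pyRange 1 (PySem.List.pyGetD month_len (m - 1) 0 + 1) 1).map
            (fun dy => fmtPad dy 2)))) PySem.Dict.empty
  (PySem.List.pyRange start (end_ + 1) 1).foldl (fun dates year =>
    let ys := fmtPad year 4
    let rev := pyRev ys
    let dd := PySem.Str.slice rev none (some 2)
    let mm := PySem.Str.slice rev (some 2) (some 4)
    let s := dd ++ mm ++ ys
    -- valid_days[mm] is guarded by the preceding 'mm in valid_days', so getD's default is never used
    if valid_days.contains mm && PySem.Set.contains (valid_days.getD mm PySem.Set.empty) dd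
        && (s == pyRev s) then
      dates ++ [dd ++ "/" ++ mm ++ "/" ++ ys]
    else dates) []

-- ===== PRECONDITION & SPEC =====
def Spec_pal_date (start : Int) (end_ : Int) (out : List String) : Prop := out = pal_date_alt start end_
instance (start : Int) (end_ : Int) (out : List String) : Decidable (Spec_pal_date start end_ out) := by unfold Spec_pal_date; infer_instance

-- ===== CLAIM (what is proved, stated in full; the proofs are below) =====
def Claim_equal_pal_date : Prop := ∀ (start : Int) (end_ : Int), Dom_pal_date start end_ → Spec_pal_date start end_ (pal_date start end_)

-- ===== LEMMAS AND PROOFS =====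

-- proof-side names for the closed pieces of the two ports
def dOf (m : Int) : Int :=
  if m ∈ ([1, 3, 5, 7, 8, 10, 12] : List Int) then 31
  else if m ∈ ([4, 6, 9, 11] : List Int) then 30 else 28

def monthsR : List Int := PySem.List.pyRange 1 13 1

def daysR (m : Int) : List Int := PySem.List.pyRange 1 (dOf m + 1) 1

def VD : PySem.Dict String (PySem.Set String) :=
  (PySem.List.pyRange 1 13 1).foldl (fun d m =>
      d.insert (fmtPad m 2)
        (PySem.Set.ofList
          ((PySem.List.pyRange 1
              (PySem.List.pyGetD ([31, 28, 31, 30, 31, 30, 31, 31, 30, 31, 30, 31] : List Int) (m - 1) 0 + 1) 1).map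
            (fun dy => fmtPad dy 2)))) PySem.Dict.empty

def ylOf (y : Int) : List Char := (fmtPad y 4).toList
def rlOf (y : Int) : List Char := (ylOf y).reverse
def Ppal (y : Int) : Prop := (rlOf y).take 4 ++ ylOf y = ((rlOf y).take 4 ++ ylOf y).reverse
def ddOf (y : Int) : String := PySem.Str.slice (pyRev (fmtPad y 4)) none (some 2)
def mmOf (y : Int) : String := PySem.Str.slice (pyRev (fmtPad y 4)) (some 2) (some 4)

def Ayear (y : Int) : List String :=
  monthsR.flatMap (fun month =>
    ((daysR month).filter
        (fun day => is_palindrome (fmtPad day 2 ++ fmtPad month 2 ++ fmtPad y 4))).map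
      (fun day => fmtPad day 2 ++ "/" ++ fmtPad month 2 ++ "/" ++ fmtPad y 4))

def Byear (y : Int) : List String :=
  if VD.contains (mmOf y) && PySem.Set.contains (VD.getD (mmOf y) PySem.Set.empty) (ddOf y)
      && ((ddOf y ++ mmOf y ++ fmtPad y 4) == pyRev (ddOf y ++ mmOf y ++ fmtPad y 4)) then
    [ddOf y ++ "/" ++ mmOf y ++ "/" ++ fmtPad y 4]
  else []

-- closed facts about the tables, discharged by evaluation
theorem lenPad2 : ∀ m ∈ monthsR, ∀ d ∈ daysR m, (fmtPad d 2).toList.length = 2 := by decide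
theorem keysVD : VD.keys = monthsR.map (fun m => fmtPad m 2) := by decide
theorem getVD : ∀ m ∈ monthsR,
    VD.getD (fmtPad m 2) PySem.Set.empty = (daysR m).map (fun d => fmtPad d 2) ∧
    VD.contains (fmtPad m 2) = true := by decide
theorem lenPad2M : ∀ m ∈ monthsR, (fmtPad m 2).toList.length = 2 := by decide
theorem monthsR_nodup : monthsR.Nodup := by decide
theorem daysR_nodup : ∀ m ∈ monthsR, (daysR m).Nodup := by decide

theorem injM : ∀ m ∈ monthsR, ∀ m' ∈ monthsR,
    (fmtPad m 2).toList = (fmtPad m' 2).toList → m = m' := by decide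
theorem injD : ∀ m ∈ monthsR, ∀ d ∈ daysR m, ∀ d' ∈ daysR m,
    (fmtPad d 2).toList = (fmtPad d' 2).toList → d = d' := by decide

theorem toList_pyRev (s : String) : (pyRev s).toList = s.toList.reverse := by
  unfold pyRev
  rw [PySem.Str.slice?_none_none_neg_one]
  simp [String.toList_ofList]

theorem strEq_iff (s t : String) : (s == t) = true ↔ s.toList = t.toList := by
  rw [beq_iff_eq]; exact String.toList_inj.symm

theorem ispal_iff (s : String) : is_palindrome s = true ↔ s.toList = s.toList.reverse := by
  unfold is_palindrome
  rw [strEq_iff, toList_pyRev]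

theorem len_yl (y : Int) : 4 ≤ (ylOf y).length := by
  unfold ylOf fmtPad
  rw [PySem.Str.toList_zfill, PySem.Chars.length_zfill]
  omega

theorem ddOf_toList (y : Int) : (ddOf y).toList = (rlOf y).take 2 := by
  unfold ddOf rlOf ylOf
  rw [PySem.Str.toList_slice, PySem.Chars.slice_eq_listSlice,
    PySem.List.slice_to _ (b := 2) (by norm_num), toList_pyRev]
  rfl

theorem mmOf_toList (y : Int) : (mmOf y).toList = ((rlOf y).drop 2).take 2 := by
  unfold mmOf rlOf ylOf
  rw [PySem.Str.toList_slice, PySem.Chars.slice_eq_listSlice,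
    PySem.List.slice_toNat _ (a := 2) (b := 4) (by norm_num) (by norm_num), toList_pyRev]
  rfl

theorem take4_split (y : Int) :
    (rlOf y).take 4 = (rlOf y).take 2 ++ ((rlOf y).drop 2).take 2 := by
  rw [show (4 : Nat) = 2 + 2 from rfl, List.take_add]

-- the structural palindrome lemma: a DDMMYYYY palindrome forces DD and MM
theorem pal_struct (D M Y : List Char) (hD : D.length = 2) (hM : M.length = 2)
    (hY : 4 ≤ Y.length) :
    (D ++ (M ++ Y) = (D ++ (M ++ Y)).reverse) ↔
      (D = Y.reverse.take 2 ∧ M = (Y.reverse.drop 2).take 2 ∧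
        Y.reverse.take 4 ++ Y = (Y.reverse.take 4 ++ Y).reverse) := by
  have hYr : Y.reverse.length = Y.length := Y.length_reverse
  constructor
  · intro h
    have hrev : (D ++ (M ++ Y)).reverse = Y.reverse ++ (M.reverse ++ D.reverse) := by
      simp [List.reverse_append]
    have hb2 : (2 : Nat) ≤ Y.reverse.length := by omega
    have hDeq : D = Y.reverse.take 2 := by
      have h1 : (D ++ (M ++ Y)).take 2 = D := List.take_left' hD
      have h2 : (Y.reverse ++ (M.reverse ++ D.reverse)).take 2 = Y.reverse.take 2 :=
        List.take_append_of_le_length hb2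
      rw [← h1, h, hrev, h2]
    have hMeq : M = (Y.reverse.drop 2).take 2 := by
      have h1 : ((D ++ (M ++ Y)).drop 2).take 2 = M := by
        rw [List.drop_left' hD]
        exact List.take_left' hM
      have hb2' : (2 : Nat) ≤ (Y.reverse.drop 2).length := by
        rw [List.length_drop]; omega
      have h2 : ((Y.reverse ++ (M.reverse ++ D.reverse)).drop 2).take 2 =
          (Y.reverse.drop 2).take 2 := by
        rw [List.drop_append_of_le_length hb2]
        exact List.take_append_of_le_length hb2'
      rw [← h1, h, hrev, h2]
    refine ⟨hDeq, hMeq, ?_⟩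
    have hsplit : Y.reverse.take 4 = Y.reverse.take 2 ++ (Y.reverse.drop 2).take 2 := by
      rw [show (4 : Nat) = 2 + 2 from rfl, List.take_add]
    calc Y.reverse.take 4 ++ Y
        = D ++ (M ++ Y) := by rw [hsplit, ← hDeq, ← hMeq, List.append_assoc]
      _ = (D ++ (M ++ Y)).reverse := h
      _ = (Y.reverse.take 4 ++ Y).reverse := by
            rw [hsplit, ← hDeq, ← hMeq, List.append_assoc]
  · rintro ⟨hDeq, hMeq, hP⟩
    have hsplit : Y.reverse.take 4 = Y.reverse.take 2 ++ (Y.reverse.drop 2).take 2 := by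
      rw [show (4 : Nat) = 2 + 2 from rfl, List.take_add]
    calc D ++ (M ++ Y)
        = Y.reverse.take 4 ++ Y := by rw [hsplit, hDeq, hMeq, List.append_assoc]
      _ = (Y.reverse.take 4 ++ Y).reverse := hP
      _ = (D ++ (M ++ Y)).reverse := by rw [hsplit, hDeq, hMeq, List.append_assoc]

theorem C1 (y m d : Int) (hm : m ∈ monthsR) (hd : d ∈ daysR m) :
    is_palindrome (fmtPad d 2 ++ fmtPad m 2 ++ fmtPad y 4) = true ↔
      ((fmtPad d 2).toList = (rlOf y).take 2 ∧
        (fmtPad m 2).toList = ((rlOf y).drop 2).take 2 ∧ Ppal y) := by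
  rw [ispal_iff]
  have hlist : (fmtPad d 2 ++ fmtPad m 2 ++ fmtPad y 4).toList
      = (fmtPad d 2).toList ++ ((fmtPad m 2).toList ++ (fmtPad y 4).toList) := by
    simp [String.toList_append]
  rw [hlist]
  unfold Ppal rlOf ylOf
  exact pal_struct _ _ _ (lenPad2 m hm d hd) (lenPad2M m hm) (len_yl y)

theorem filter_eq_singleton {α : Type} (l : List α) (q : α → Bool) (a : α)
    (hnd : l.Nodup) (ha : a ∈ l) (h : ∀ x ∈ l, q x = true ↔ x = a) :
    l.filter q = [a] := by
  induction l with
  | nil => cases ha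
  | cons x xs ih =>
    by_cases hxa : x = a
    · subst hxa
      rw [List.filter_cons_of_pos ((h x (List.mem_cons_self)).mpr rfl)]
      have hnil : xs.filter q = [] := List.filter_eq_nil_iff.mpr (fun z hz hq => by
        have hz' := (h z (List.mem_cons_of_mem _ hz)).mp hq
        exact (List.nodup_cons.mp hnd).1 (hz' ▸ hz))
      rw [hnil]
    · have hax : a ∈ xs := by
        rcases List.mem_cons.mp ha with h1 | h1
        · exact absurd h1.symm hxa
        · exact h1
      rw [List.filter_cons_of_neg (by
        intro hq
        exact hxa ((h x (List.mem_cons_self)).mp hq))]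
      exact ih (List.nodup_cons.mp hnd).2 hax (fun z hz => h z (List.mem_cons_of_mem _ hz))

theorem flatMap_eq_singleton {α β : Type} (l : List α) (h : α → List β) (a : α)
    (out : List β) (hnd : l.Nodup) (ha : a ∈ l)
    (hother : ∀ x ∈ l, x ≠ a → h x = []) (hha : h a = out) :
    l.flatMap h = out := by
  induction l with
  | nil => cases ha
  | cons x xs ih =>
    rw [List.flatMap_cons]
    by_cases hxa : x = a
    · subst hxa
      have hnil : xs.flatMap h = [] := List.flatMap_eq_nil_iff.mpr (fun z hz =>
        hother z (List.mem_cons_of_mem _ hz) (fun he => (List.nodup_cons.mp hnd).1 (he ▸ hz)))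
      rw [hnil, hha, List.append_nil]
    · have hax : a ∈ xs := by
        rcases List.mem_cons.mp ha with h1 | h1
        · exact absurd h1.symm hxa
        · exact h1
      rw [hother x (List.mem_cons_self) hxa, List.nil_append]
      exact ih (List.nodup_cons.mp hnd).2 hax
        (fun z hz hza => hother z (List.mem_cons_of_mem _ hz) hza)

theorem Bpal_iff (y : Int) :
    ((ddOf y ++ mmOf y ++ fmtPad y 4) == pyRev (ddOf y ++ mmOf y ++ fmtPad y 4)) = true ↔
      Ppal y := by
  rw [strEq_iff, toList_pyRev]
  have h : (ddOf y ++ mmOf y ++ fmtPad y 4).toList = (rlOf y).take 4 ++ ylOf y := by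
    simp [String.toList_append, ddOf_toList, mmOf_toList, take4_split, ylOf]
  rw [h]
  unfold Ppal
  exact Iff.rfl

theorem year_eq (y : Int) : Ayear y = Byear y := by
  by_cases hc : VD.contains (mmOf y) = true
  · -- month string is a key: find the month m0 it belongs to
    have hkeys : mmOf y ∈ VD.keys := (PySem.Dict.contains_iff_mem_keys _ _).mp hc
    rw [keysVD] at hkeys
    obtain ⟨m0, hm0, hm0eq⟩ := List.mem_map.mp hkeys
    by_cases hdd : PySem.Set.contains (VD.getD (mmOf y) PySem.Set.empty) (ddOf y) = true
    · -- day string is valid for that month: find d0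
      have hdd' := hdd
      rw [← hm0eq, (getVD m0 hm0).1] at hdd'
      have hddmem : ddOf y ∈ (daysR m0).map (fun d => fmtPad d 2) :=
        (PySem.Set.contains_iff _ _).mp hdd'
      obtain ⟨d0, hd0, hd0eq⟩ := List.mem_map.mp hddmem
      by_cases hP : Ppal y
      · -- the unique candidate is a palindrome: both sides are that one date
        have hA : Ayear y = [fmtPad d0 2 ++ "/" ++ fmtPad m0 2 ++ "/" ++ fmtPad y 4] := by
          unfold Ayear
          refine flatMap_eq_singleton _ _ m0 _ monthsR_nodup hm0 ?_ ?_
          · intro m hm hne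
            rw [List.map_eq_nil_iff, List.filter_eq_nil_iff]
            intro d hd hpal
            have h3 := (C1 y m d hm hd).mp hpal
            exact hne (injM m hm m0 hm0 (by rw [h3.2.1, ← mmOf_toList, ← hm0eq]))
          · rw [filter_eq_singleton (daysR m0) _ d0 (daysR_nodup m0 hm0) hd0 (by
              intro d hd
              constructor
              · intro hpal
                have h3 := (C1 y m0 d hm0 hd).mp hpal
                exact injD m0 hm0 d hd d0 hd0 (by rw [h3.1, ← ddOf_toList, ← hd0eq])
              · intro he
                subst he
                exact (C1 y m0 d hm0 hd).mpr
                  ⟨by rw [hd0eq, ddOf_toList], by rw [hm0eq, mmOf_toList], hP⟩)]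
            simp
        have hB : Byear y = [ddOf y ++ "/" ++ mmOf y ++ "/" ++ fmtPad y 4] := by
          unfold Byear
          rw [if_pos (by rw [hc, hdd, (Bpal_iff y).mpr hP]; rfl)]
        rw [hA, hB, hd0eq, hm0eq]
      · -- candidate not a palindrome: both sides empty
        have hB : Byear y = [] := by
          unfold Byear
          rw [if_neg (by
            intro hcond
            exact hP ((Bpal_iff y).mp (by
              rcases Bool.and_eq_true_iff.mp hcond with ⟨_, h2⟩
              exact h2)))]
        rw [hB]
        unfold Ayear
        apply List.flatMap_eq_nil_iff.mpr
        intro m hm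
        rw [List.map_eq_nil_iff, List.filter_eq_nil_iff]
        intro d hd hpal
        exact hP ((C1 y m d hm hd).mp hpal).2.2
    · -- day string invalid: both sides empty
      have hB : Byear y = [] := by
        unfold Byear
        rw [if_neg (by
          intro hcond
          rcases Bool.and_eq_true_iff.mp hcond with ⟨h1, _⟩
          rcases Bool.and_eq_true_iff.mp h1 with ⟨_, h12⟩
          exact hdd h12)]
      rw [hB]
      unfold Ayear
      apply List.flatMap_eq_nil_iff.mpr
      intro m hm
      rw [List.map_eq_nil_iff, List.filter_eq_nil_iff]
      intro d hd hpal
      have h3 := (C1 y m d hm hd).mp hpal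
      have hmm0 : m = m0 := injM m hm m0 hm0 (by rw [h3.2.1, ← mmOf_toList, ← hm0eq])
      subst hmm0
      apply hdd
      rw [← hm0eq, (getVD m hm).1]
      exact (PySem.Set.contains_iff _ _).mpr
        (List.mem_map.mpr ⟨d, hd, String.toList_inj.mp (by rw [h3.1, ← ddOf_toList])⟩)
  · -- month string is no key: both sides empty
    have hB : Byear y = [] := by
      unfold Byear
      rw [if_neg (by
        intro hcond
        rcases Bool.and_eq_true_iff.mp hcond with ⟨h1, _⟩
        rcases Bool.and_eq_true_iff.mp h1 with ⟨h11, _⟩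
        exact hc h11)]
    rw [hB]
    unfold Ayear
    apply List.flatMap_eq_nil_iff.mpr
    intro m hm
    rw [List.map_eq_nil_iff, List.filter_eq_nil_iff]
    intro d hd hpal
    have h3 := (C1 y m d hm hd).mp hpal
    apply hc
    rw [← String.toList_inj.mp (by rw [h3.2.1, ← mmOf_toList] :
      (fmtPad m 2).toList = (mmOf y).toList)]
    exact (getVD m hm).2

theorem A_shape (s e : Int) :
    pal_date s e = (PySem.List.pyRange s (e + 1) 1).flatMap Ayear := by
  unfold pal_date
  have h1 : ∀ (acc : List String) (y : Int), y ∈ PySem.List.pyRange s (e + 1) 1 →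
      (PySem.List.pyRange 1 13 1).foldl (fun dates month =>
        (PySem.List.pyRange 1
            ((if month ∈ ([1, 3, 5, 7, 8, 10, 12] : List Int) then (31 : Int)
              else if month ∈ ([4, 6, 9, 11] : List Int) then 30 else 28) + 1) 1).foldl
          (fun dates day =>
            if is_palindrome (fmtPad day 2 ++ fmtPad month 2 ++ fmtPad y 4) then
              dates ++ [fmtPad day 2 ++ "/" ++ fmtPad month 2 ++ "/" ++ fmtPad y 4]
            else dates) dates) acc = acc ++ Ayear y := by
    intro acc y _
    have h2 : ∀ (acc2 : List String) (m : Int), m ∈ PySem.List.pyRange 1 13 1 →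
        (PySem.List.pyRange 1
            ((if m ∈ ([1, 3, 5, 7, 8, 10, 12] : List Int) then (31 : Int)
              else if m ∈ ([4, 6, 9, 11] : List Int) then 30 else 28) + 1) 1).foldl
          (fun dates day =>
            if is_palindrome (fmtPad day 2 ++ fmtPad m 2 ++ fmtPad y 4) then
              dates ++ [fmtPad day 2 ++ "/" ++ fmtPad m 2 ++ "/" ++ fmtPad y 4]
            else dates) acc2
        = acc2 ++ ((PySem.List.pyRange 1
            ((if m ∈ ([1, 3, 5, 7, 8, 10, 12] : List Int) then (31 : Int)
              else if m ∈ ([4, 6, 9, 11] : List Int) then 30 else 28) + 1) 1).filter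
            (fun day => is_palindrome (fmtPad day 2 ++ fmtPad m 2 ++ fmtPad y 4))).map
            (fun day => fmtPad day 2 ++ "/" ++ fmtPad m 2 ++ "/" ++ fmtPad y 4) := by
      intro acc2 m _
      exact PySem.List.foldl_append_if _ _ _ _
    rw [PySem.List.foldl_congr_mem _ _ _ _ h2, PySem.List.foldl_append_eq_flatMap]
    rfl
  rw [PySem.List.foldl_congr_mem _ _ _ _ h1, PySem.List.foldl_append_eq_flatMap]
  simp

theorem B_shape (s e : Int) :
    pal_date_alt s e = (PySem.List.pyRange s (e + 1) 1).flatMap Byear := by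
  rw [show pal_date_alt s e = (PySem.List.pyRange s (e + 1) 1).foldl
      (fun acc y =>
        if VD.contains (mmOf y)
            && PySem.Set.contains (VD.getD (mmOf y) PySem.Set.empty) (ddOf y)
            && ((ddOf y ++ mmOf y ++ fmtPad y 4) == pyRev (ddOf y ++ mmOf y ++ fmtPad y 4)) then
          acc ++ [ddOf y ++ "/" ++ mmOf y ++ "/" ++ fmtPad y 4]
        else acc) [] from rfl]
  have h1 : ∀ (acc : List String) (y : Int), y ∈ PySem.List.pyRange s (e + 1) 1 →
      (if VD.contains (mmOf y)
            && PySem.Set.contains (VD.getD (mmOf y) PySem.Set.empty) (ddOf y)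
            && ((ddOf y ++ mmOf y ++ fmtPad y 4) == pyRev (ddOf y ++ mmOf y ++ fmtPad y 4)) then
          acc ++ [ddOf y ++ "/" ++ mmOf y ++ "/" ++ fmtPad y 4]
        else acc) = acc ++ Byear y := by
    intro acc y _
    unfold Byear
    split
    · rfl
    · simp
  rw [PySem.List.foldl_congr_mem _ _ _ _ h1, PySem.List.foldl_append_eq_flatMap]
  simp


-- ===== VERDICT (by name: the statement is the Claim_ definition above) =====
theorem pal_date_spec : Claim_equal_pal_date := by
  intro s e _
  unfold Spec_pal_date
  rw [A_shape, B_shape]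
  exact List.flatMap_congr (fun y _ => year_eq y)
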